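-- pv_equiv track=rewrite | github.com/Fatal-Error114514/python | 比賽用資料/test/完美子數對.py | count_subarrays_with_min_max
-- ===== SOURCE A (Python) =====
-- def count_subarrays_with_min_max(arr, min_val, max_val):
--     n = len(arr)
--     left = 0
--     count = 0
--     min_pos = -1
--     max_pos = -1
--
--     # 遍歷整個數組
--     for right in range(n):
--         # 當右指針指向最小值或最大值時，更新對應的位置
--         if arr[right] == min_val:
--             min_pos = right
--         if arr[right] == max_val:
--             max_pos = right
--
--         # 當窗口內同時包含最小值和最大值時，更新計數
--         if min_pos != -1 and max_pos != -1:
--             # 當最小值和最大值都出現時，從 left 到 right 的所有子串列都滿足條件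
--             count += min(min_pos, max_pos) - left + 1
--
--     return count
-- ===== SOURCE B (Python) =====
-- def count_subarrays_with_min_max(arr, min_val, max_val):
--     # Global inclusion-exclusion: all subarrays minus those avoiding min_val,
--     # minus those avoiding max_val, plus those avoiding both; each "avoid"
--     # count is a closed-form sum of L*(L+1)//2 over maximal runs.
--     n = len(arr)
--     return (n * (n + 1) // 2
--             - _avoiding(arr, {min_val})
--             - _avoiding(arr, {max_val})
--             + _avoiding(arr, {min_val, max_val}))
--
-- def _avoiding(arr, vals):
--     # number of subarrays containing no element of vals
--     count = 0
--     length = 0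
--     for x in arr:
--         if x in vals:
--             count += length * (length + 1) // 2
--             length = 0
--         else:
--             length += 1
--     return count + length * (length + 1) // 2
-- ===== Notes on version B (the rewrite author's own statement) =====
-- stated objective: alternative
-- what changed: Replaces A's single-pass per-endpoint bookkeeping (last occurrence indices of min_val/max_val with -1 sentinels, adding min(min_pos,max_pos)+1 per right) with global inclusion-exclusion: total subarrays n*(n+1)//2 minus subarrays avoiding min_val minus those avoiding max_val plus those avoiding both, each avoid count summed in closed form L*(L+1)//2 over maximal runs.
import Mathlib
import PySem

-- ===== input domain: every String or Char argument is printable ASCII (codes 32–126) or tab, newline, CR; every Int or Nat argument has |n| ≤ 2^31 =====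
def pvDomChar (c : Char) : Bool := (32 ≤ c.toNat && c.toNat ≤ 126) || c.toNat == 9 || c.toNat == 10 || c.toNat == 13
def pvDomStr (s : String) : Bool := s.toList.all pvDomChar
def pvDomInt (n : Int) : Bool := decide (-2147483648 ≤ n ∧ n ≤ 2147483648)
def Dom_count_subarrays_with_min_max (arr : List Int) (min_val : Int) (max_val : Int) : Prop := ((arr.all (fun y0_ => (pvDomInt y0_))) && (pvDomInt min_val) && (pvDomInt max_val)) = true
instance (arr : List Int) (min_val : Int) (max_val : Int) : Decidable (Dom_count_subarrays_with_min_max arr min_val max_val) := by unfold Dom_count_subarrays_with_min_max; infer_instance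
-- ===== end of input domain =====

-- B counts by global inclusion-exclusion over maximal runs (closed-form L*(L+1)//2 per run)
-- instead of A's per-endpoint last-occurrence bookkeeping (objective: alternative, same linear cost).

-- ===== PORT A =====
-- literal transliteration of A: for right in range(n), update min_pos/max_pos, and when
-- both sentinels are set add min(min_pos, max_pos) - left + 1
def count_subarrays_with_min_max (arr : List Int) (min_val : Int) (max_val : Int) : Int :=
  let n : Int := PySem.List.len arr
  let left : Int := 0
  ((PySem.List.pyRange 0 n 1).foldl
    (fun (st : Int × Int × Int) (right : Int) =>
      let x := PySem.List.pyGetD arr right 0   -- arr[right]; right is always in range here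
      let min_pos := if x = min_val then right else st.1
      let max_pos := if x = max_val then right else st.2.1
      let count := if min_pos ≠ -1 ∧ max_pos ≠ -1
                   then st.2.2 + (min min_pos max_pos - left + 1) else st.2.2
      (min_pos, max_pos, count))
    (-1, -1, 0)).2.2

-- ===== PORT B =====
-- transliteration of Source B's helper _avoiding(arr, vals): number of subarrays containing
-- no element of vals, accumulated as length*(length+1)//2 at each run break and at the end
def pvAvoiding (arr : List Int) (vals : PySem.Set Int) : Int :=
  let st := arr.foldl
    (fun (st : Int × Int) (x : Int) =>
      if PySem.Set.contains vals x
      then (st.1 + PySem.Int.floordiv (st.2 * (st.2 + 1)) 2, 0)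
      else (st.1, st.2 + 1))
    (0, 0)
  st.1 + PySem.Int.floordiv (st.2 * (st.2 + 1)) 2

-- literal transliteration of Source B: n*(n+1)//2 - avoiding({min}) - avoiding({max}) + avoiding({min,max})
def count_subarrays_with_min_max_alt (arr : List Int) (min_val : Int) (max_val : Int) : Int :=
  let n : Int := PySem.List.len arr
  PySem.Int.floordiv (n * (n + 1)) 2
    - pvAvoiding arr (PySem.Set.ofList [min_val])
    - pvAvoiding arr (PySem.Set.ofList [max_val])
    + pvAvoiding arr (PySem.Set.ofList [min_val, max_val])

-- ===== PRECONDITION & SPEC =====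
def Spec_count_subarrays_with_min_max (arr : List Int) (min_val : Int) (max_val : Int) (out : Int) : Prop := out = count_subarrays_with_min_max_alt arr min_val max_val
instance (arr : List Int) (min_val : Int) (max_val : Int) (out : Int) : Decidable (Spec_count_subarrays_with_min_max arr min_val max_val out) := by unfold Spec_count_subarrays_with_min_max; infer_instance

-- ===== CLAIM (what is proved, stated in full; the proofs are below) =====
def Claim_equal_count_subarrays_with_min_max : Prop := ∀ (arr : List Int) (min_val : Int) (max_val : Int), Dom_count_subarrays_with_min_max arr min_val max_val → Spec_count_subarrays_with_min_max arr min_val max_val (count_subarrays_with_min_max arr min_val max_val)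

-- ===== LEMMAS AND PROOFS =====

-- ghost function: the triangular term length*(length+1)//2
def pvT (l : Int) : Int := PySem.Int.floordiv (l * (l + 1)) 2

-- ghost function: a run-length inclusion-exclusion single pass, intermediate between A and B
def pvStep (m M : Int) (st : Int × Int × Int × Int × Int) (x : Int) : Int × Int × Int × Int × Int :=
  let pos := st.1 + 1
  let ra := if x = m then 0 else st.2.1 + 1
  let rb := if x = M then 0 else st.2.2.1 + 1
  let rc := if x = m ∨ x = M then 0 else st.2.2.2.1 + 1
  (pos, ra, rb, rc, st.2.2.2.2 + (pos - ra - rb + rc))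

-- ghost function: the _avoiding-style fold with predicate q from accumulator c and run length l
def pvF (q : Int → Prop) [DecidablePred q] (xs : List Int) (c l : Int) : Int :=
  let st := xs.foldl (fun (st : Int × Int) x => if q x then (st.1 + pvT st.2, 0) else (st.1, st.2 + 1)) (c, l)
  st.1 + pvT st.2

-- ghost function: pvPsum xs p = (p+1) + (p+2) + … + (p + len xs)
def pvPsum : List Int → Int → Int
  | [], _ => 0
  | _ :: xs, p => (p + 1) + pvPsum xs (p + 1)

theorem pvT_succ (l : Int) : pvT (l + 1) = pvT l + (l + 1) := by
  have h2 : (0:Int) < 2 := by norm_num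
  simp only [pvT, PySem.Int.floordiv_eq_ediv_of_pos h2]
  rw [show (l + 1) * (l + 1 + 1) = l * (l + 1) + (l + 1) * 2 from by ring,
    Int.add_mul_ediv_right _ _ (by norm_num : (2:Int) ≠ 0)]

theorem pvT_zero : pvT 0 = 0 := by decide

theorem pvF_shift (q : Int → Prop) [DecidablePred q] :
    ∀ (xs : List Int) (c l : Int), pvF q xs c l = c + pvF q xs 0 l := by
  intro xs
  induction xs with
  | nil => intro c l; simp [pvF]
  | cons x xs ih =>
    intro c l
    simp only [pvF, List.foldl_cons]
    by_cases hq : q x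
    · simp only [if_pos hq]
      have h1 := ih (c + pvT l) 0
      have h2 := ih (0 + pvT l) 0
      simp only [pvF] at h1 h2
      rw [h1, h2]; ring
    · simp only [if_neg hq]
      have h1 := ih c (l + 1)
      simp only [pvF] at h1
      rw [h1]

theorem pvF_cons (q : Int → Prop) [DecidablePred q] (x : Int) (xs : List Int) (l : Int) :
    pvF q (x :: xs) 0 l = if q x then pvT l + pvF q xs 0 0 else pvF q xs 0 (l + 1) := by
  by_cases hq : q x
  · simp only [pvF, List.foldl_cons, if_pos hq, zero_add]
    have h := pvF_shift q xs (pvT l) 0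
    simp only [pvF] at h
    rw [h]
  · simp only [pvF, List.foldl_cons, if_neg hq]

-- invariant: A's state after i elements is (mp, mx, cnt) with mp/mx the last occurrence
-- indices (-1 if none); the run-length pass carries (i, i-1-mp, i-1-mx, i-1-max mp mx, cnt)
theorem pv_loop_eq (min_val max_val : Int) :
    ∀ (xs : List Int) (i mp mx cnt : Int),
      -1 ≤ mp → mp < i → -1 ≤ mx → mx < i →
      ((PySem.List.enumerate xs i).foldl
        (fun (st : Int × Int × Int) (p : Int × Int) =>
          let min_pos := if p.2 = min_val then p.1 else st.1
          let max_pos := if p.2 = max_val then p.1 else st.2.1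
          let count := if min_pos ≠ -1 ∧ max_pos ≠ -1
                       then st.2.2 + (min min_pos max_pos - 0 + 1) else st.2.2
          (min_pos, max_pos, count)) (mp, mx, cnt)).2.2
      =
      (xs.foldl (pvStep min_val max_val)
        (i, i - 1 - mp, i - 1 - mx, i - 1 - max mp mx, cnt)).2.2.2.2 := by
  intro xs
  induction xs with
  | nil => intro i mp mx cnt _ _ _ _; simp [PySem.List.enumerate]
  | cons x xs ih =>
    intro i mp mx cnt h1 h2 h3 h4
    simp only [PySem.List.enumerate, List.foldl_cons, pvStep]
    have hmp1 : -1 ≤ (if x = min_val then i else mp) := by split <;> omega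
    have hmp2 : (if x = min_val then i else mp) < i + 1 := by split <;> omega
    have hmx1 : -1 ≤ (if x = max_val then i else mx) := by split <;> omega
    have hmx2 : (if x = max_val then i else mx) < i + 1 := by split <;> omega
    rw [ih (i + 1) _ _ _ hmp1 hmp2 hmx1 hmx2]
    have hstate :
        ((i : Int) + 1,
         i + 1 - 1 - (if x = min_val then i else mp),
         i + 1 - 1 - (if x = max_val then i else mx),
         i + 1 - 1 - max (if x = min_val then i else mp) (if x = max_val then i else mx),
         (if (if x = min_val then i else mp) ≠ -1 ∧ (if x = max_val then i else mx) ≠ -1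
          then cnt + (min (if x = min_val then i else mp) (if x = max_val then i else mx) - 0 + 1)
          else cnt))
        =
        ((i : Int) + 1,
         (if x = min_val then 0 else i - 1 - mp + 1),
         (if x = max_val then 0 else i - 1 - mx + 1),
         (if x = min_val ∨ x = max_val then 0 else i - 1 - max mp mx + 1),
         cnt + ((i + 1) - (if x = min_val then 0 else i - 1 - mp + 1)
                 - (if x = max_val then 0 else i - 1 - mx + 1)
                 + (if x = min_val ∨ x = max_val then 0 else i - 1 - max mp mx + 1))) := by
      have h5 : max mp mx < i := by omega
      refine Prod.ext rfl (Prod.ext ?_ (Prod.ext ?_ (Prod.ext ?_ ?_))) <;>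
        simp only [] <;> split_ifs <;> first | rfl | omega
    rw [hstate]

-- the run-length pass equals position-sum minus the three avoiding folds (inclusion-exclusion)
theorem pv_main (m M : Int) :
    ∀ (xs : List Int) (pos ra rb rc cnt : Int),
      (xs.foldl (pvStep m M) (pos, ra, rb, rc, cnt)).2.2.2.2
      = cnt + pvPsum xs pos
          - (pvF (fun x => x = m) xs 0 ra - pvT ra)
          - (pvF (fun x => x = M) xs 0 rb - pvT rb)
          + (pvF (fun x => x = m ∨ x = M) xs 0 rc - pvT rc) := by
  intro xs
  induction xs with
  | nil => intro pos ra rb rc cnt; simp [pvPsum, pvF]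
  | cons x xs ih =>
    intro pos ra rb rc cnt
    rw [List.foldl_cons]
    simp only [pvStep]
    rw [ih, pvF_cons (fun x => x = m) x xs ra, pvF_cons (fun x => x = M) x xs rb,
      pvF_cons (fun x => x = m ∨ x = M) x xs rc]
    simp only [pvPsum]
    by_cases h1 : x = m <;> by_cases h2 : x = M
    · simp only [if_pos h1, if_pos h2, if_pos (Or.inl h1 : x = m ∨ x = M)]
      linarith [pvT_succ ra, pvT_succ rb, pvT_succ rc, pvT_zero]
    · simp only [if_pos h1, if_neg h2, if_pos (Or.inl h1 : x = m ∨ x = M)]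
      linarith [pvT_succ ra, pvT_succ rb, pvT_succ rc, pvT_zero]
    · simp only [if_neg h1, if_pos h2, if_pos (Or.inr h2 : x = m ∨ x = M)]
      linarith [pvT_succ ra, pvT_succ rb, pvT_succ rc, pvT_zero]
    · simp only [if_neg h1, if_neg h2, if_neg (show ¬ (x = m ∨ x = M) by tauto)]
      linarith [pvT_succ ra, pvT_succ rb, pvT_succ rc, pvT_zero]

-- pvPsum xs p = pvT (p + len xs) - pvT p
theorem pvPsum_eq : ∀ (xs : List Int) (p : Int), pvPsum xs p = pvT (p + xs.length) - pvT p := by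
  intro xs
  induction xs with
  | nil => intro p; simp [pvPsum]
  | cons x xs ih =>
    intro p
    simp only [pvPsum, ih (p + 1), List.length_cons]
    push_cast
    rw [show p + ((xs.length : Int) + 1) = (p + 1) + (xs.length : Int) from by ring]
    linarith [pvT_succ p]

-- B's _avoiding fold is pvF with the matching membership predicate
theorem pvAvoiding_eq (xs : List Int) (vals : PySem.Set Int) (q : Int → Prop) [DecidablePred q]
    (h : ∀ x, PySem.Set.contains vals x = true ↔ q x) :
    pvAvoiding xs vals = pvF q xs 0 0 := by
  have hf : (fun (st : Int × Int) (x : Int) =>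
      if PySem.Set.contains vals x
      then (st.1 + PySem.Int.floordiv (st.2 * (st.2 + 1)) 2, 0)
      else (st.1, st.2 + 1))
    = (fun (st : Int × Int) (x : Int) => if q x then (st.1 + pvT st.2, 0) else (st.1, st.2 + 1)) := by
    funext st x
    by_cases hx : q x
    · rw [if_pos ((h x).mpr hx), if_pos hx]; rfl
    · rw [if_neg (fun hc => hx ((h x).mp hc)), if_neg hx]
  simp only [pvAvoiding, pvF, hf, pvT]

theorem pv_contains_one (m x : Int) :
    PySem.Set.contains (PySem.Set.ofList [m]) x = true ↔ x = m := by
  simp [PySem.Set.mem_ofList]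

theorem pv_contains_two (m M x : Int) :
    PySem.Set.contains (PySem.Set.ofList [m, M]) x = true ↔ (x = m ∨ x = M) := by
  simp [PySem.Set.mem_ofList]

theorem pv_ports_eq (arr : List Int) (min_val max_val : Int) :
    count_subarrays_with_min_max arr min_val max_val
      = count_subarrays_with_min_max_alt arr min_val max_val := by
  have h := pv_loop_eq min_val max_val arr 0 (-1) (-1) 0 (by omega) (by omega) (by omega) (by omega)
  rw [PySem.List.enumerate_eq_map_pyRange arr 0, List.foldl_map] at h
  have hA : count_subarrays_with_min_max arr min_val max_val
      = (arr.foldl (pvStep min_val max_val) (0, 0, 0, 0, 0)).2.2.2.2 := by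
    simp only [count_subarrays_with_min_max, PySem.List.len] at h ⊢
    convert h using 2
  rw [hA, pv_main, pvPsum_eq]
  have e1 := pvAvoiding_eq arr (PySem.Set.ofList [min_val]) (fun x => x = min_val)
    (pv_contains_one min_val)
  have e2 := pvAvoiding_eq arr (PySem.Set.ofList [max_val]) (fun x => x = max_val)
    (pv_contains_one max_val)
  have e3 := pvAvoiding_eq arr (PySem.Set.ofList [min_val, max_val])
    (fun x => x = min_val ∨ x = max_val) (pv_contains_two min_val max_val)
  simp only [count_subarrays_with_min_max_alt, PySem.List.len, e1, e2, e3, pvT_zero,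
    zero_add, sub_zero]
  simp only [pvT]

-- ===== VERDICT (by name: the statement is the Claim_ definition above) =====
theorem count_subarrays_with_min_max_spec : Claim_equal_count_subarrays_with_min_max := by
  intro arr min_val max_val _
  exact pv_ports_eq arr min_val max_val
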